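-- pv_equiv track=rewrite | github.com/vilsuo/codon-usage | src/markov.py | get_context_frequncies
-- ===== SOURCE A (Python) =====
-- def get_context_frequncies(s, k):
--     """
--     Return dictionary associating for each k-mer 'W' of 's' a dictionary containing the
--     frequencies of alphabets appearing right after 'W', or equivalently:
--
--         { W : {c : frequency of substrings Wc of s } for each k-mer W of s }.
--
--     Does not contain mappings for missing k-mers/missing alphabets for existing k-mers.
--     """
--
--     context_freqs = dict()
--     for i in range(k, len(s)):
--         k_mer = s[(i - k) : i]
--         c = s[i]
--
--         if k_mer not in context_freqs:
--             context_freqs[k_mer] = dict()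
--
--         if c not in context_freqs[k_mer]:
--             context_freqs[k_mer][c] = 0
--
--         context_freqs[k_mer][c] += 1
--
--     return context_freqs
-- ===== SOURCE B (Python) =====
-- def get_context_frequncies(s, k):
--     # phase 1: only collect, per context, the list of characters that follow it (no counting)
--     groups = {}
--     for i in range(k, len(s)):
--         groups.setdefault(s[i - k:i], []).append(s[i])
--     # phase 2: per context, dedup the followers in order and count each with list.count
--     return {w: {c: ws.count(c) for c in dict.fromkeys(ws)} for w, ws in groups.items()}
-- ===== Notes on version B (the rewrite author's own statement) =====
-- stated objective: alternative
-- what changed: Instead of incrementing counters in nested dicts as it scans, B only collects the raw follower-character list of each context in its pass, and then produces each frequency table afterwards by order-preserving dedup plus list.count.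
import Mathlib
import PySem

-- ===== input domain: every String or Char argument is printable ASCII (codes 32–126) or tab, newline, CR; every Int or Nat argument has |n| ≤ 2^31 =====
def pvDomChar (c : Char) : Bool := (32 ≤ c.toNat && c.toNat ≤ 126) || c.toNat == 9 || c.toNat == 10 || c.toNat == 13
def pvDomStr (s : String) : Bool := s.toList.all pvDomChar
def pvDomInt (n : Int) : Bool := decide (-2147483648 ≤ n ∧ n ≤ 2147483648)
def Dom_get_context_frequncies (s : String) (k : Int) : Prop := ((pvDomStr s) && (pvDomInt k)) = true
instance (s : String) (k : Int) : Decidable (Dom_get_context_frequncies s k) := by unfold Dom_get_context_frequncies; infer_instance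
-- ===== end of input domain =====

-- B drops A's increment-as-you-go nested counters: its pass only collects each
-- context's raw follower-character list; the frequency tables are produced
-- afterwards by order-preserving dedup plus list.count (objective: alternative).


-- ===== PORT A =====
def get_context_frequncies (s : String) (k : Int) : List (String × List (String × Int)) :=
  let d := (PySem.List.pyRange k (PySem.Str.len s) 1).foldl
    (fun cf i =>
      match PySem.Str.pyGet? s i with
      | none => cf  -- s[i] raises IndexError in Python; excluded by Pre_
      | some ch =>
        let kmer := PySem.Str.slice s (some (i - k)) (some i)
        let c := String.ofList [ch]
        let cf := if cf.contains kmer then cf else cf.insert kmer (PySem.Dict.empty : PySem.Dict String Int)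
        let inner := cf.getD kmer PySem.Dict.empty
        let inner' := if inner.contains c then inner else inner.insert c (0 : Int)
        cf.insert kmer (inner'.insert c (inner'.getD c 0 + 1)))
    PySem.Dict.empty
  d.items.map (fun p => (p.1, p.2.items))

-- ===== PORT B =====
def get_context_frequncies_alt (s : String) (k : Int) : List (String × List (String × Int)) :=
  -- phase 1: groups.setdefault(s[i-k:i], []).append(s[i])
  let groups := (PySem.List.pyRange k (PySem.Str.len s) 1).foldl
    (fun g i =>
      match PySem.Str.pyGet? s i with
      | none => g  -- s[i] raises IndexError in Python; excluded by Pre_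
      | some ch =>
        let w := PySem.Str.slice s (some (i - k)) (some i)
        let g := g.setdefault w ([] : List String)
        g.insert w (g.getD w [] ++ [String.ofList [ch]]))
    PySem.Dict.empty
  -- phase 2: {w: {c: ws.count(c) for c in dict.fromkeys(ws)} for w, ws in groups.items()}
  groups.items.map (fun p =>
    (p.1, (PySem.Set.ofList p.2).map (fun c => (c, (p.2.count c : Int)))))

-- ===== PRECONDITION & SPEC =====
-- Pre_ excludes exactly the inputs where Python raises IndexError: s[i] at i = k with
-- k < -len(s) (the first loop iteration).  Both A and B raise there.
def Pre_get_context_frequncies (s : String) (k : Int) : Prop := -(PySem.Str.len s) ≤ k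
instance (s : String) (k : Int) : Decidable (Pre_get_context_frequncies s k) := by unfold Pre_get_context_frequncies; infer_instance
def pvWitness_get_context_frequncies : String × Int := ("abcab", 1)

def Spec_get_context_frequncies (s : String) (k : Int) (out : List (String × List (String × Int))) : Prop := out = get_context_frequncies_alt s k
instance (s : String) (k : Int) (out : List (String × List (String × Int))) : Decidable (Spec_get_context_frequncies s k out) := by unfold Spec_get_context_frequncies; infer_instance

-- ===== CLAIM (what is proved, stated in full; the proofs are below) =====
def Claim_equal_get_context_frequncies : Prop := ∀ (s : String) (k : Int), Dom_get_context_frequncies s k → Pre_get_context_frequncies s k → Spec_get_context_frequncies s k (get_context_frequncies s k)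

-- ===== LEMMAS AND PROOFS =====

-- the (context, next-char) pair read at index i, none where s[i] raises
def pvKeyf (s : String) (k : Int) (i : Int) : Option (String × String) :=
  (PySem.Str.pyGet? s i).map (fun ch => (PySem.Str.slice s (some (i - k)) (some i), String.ofList [ch]))

-- A's loop body in normal form
def pvStepA (cf : PySem.Dict String (PySem.Dict String Int)) (p : String × String) : PySem.Dict String (PySem.Dict String Int) :=
  cf.insert p.1 ((cf.getD p.1 PySem.Dict.empty).insert p.2 ((cf.getD p.1 PySem.Dict.empty).getD p.2 0 + 1))

-- B's phase-1 body in normal form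
def pvStepB (g : PySem.Dict String (List String)) (p : String × String) : PySem.Dict String (List String) :=
  g.insert p.1 (g.getD p.1 [] ++ [p.2])

-- overwriting a freshly written key collapses to one insert
theorem pv_insert_insert {κ ν : Type} [BEq κ] [LawfulBEq κ] (d : PySem.Dict κ ν) (k : κ) (a b : ν) :
    (d.insert k a).insert k b = d.insert k b := by
  apply PySem.Dict.ext
  by_cases h : d.contains k
  · rw [PySem.Dict.items_insert, PySem.Dict.items_insert, PySem.Dict.items_insert]
    simp [h, PySem.Dict.contains_insert_self]
    intro x y _
    by_cases hp : x = k <;> simp [hp]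
  · have hk : k ∉ d.keys := fun hm => h ((PySem.Dict.contains_iff_mem_keys d k).mpr hm)
    rw [PySem.Dict.items_insert, PySem.Dict.items_insert, PySem.Dict.items_insert]
    have h' : d.contains k = false := by simpa using h
    simp only [h', PySem.Dict.contains_insert_self, if_true, if_false, Bool.false_eq_true]
    rw [List.map_append]
    congr 1
    · conv_rhs => rw [← List.map_id d.items]
      apply List.map_congr_left
      intro p hp
      have : p.1 ≠ k := by
        intro e; exact hk (e ▸ List.mem_map_of_mem hp (f := Prod.fst))
      simp [this]
    · simp

-- A's let-cascade equals the normal form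
theorem pv_stepA_eq (cf : PySem.Dict String (PySem.Dict String Int)) (p : String × String) :
    (let cf' := if cf.contains p.1 then cf else cf.insert p.1 (PySem.Dict.empty : PySem.Dict String Int)
     let inner := cf'.getD p.1 PySem.Dict.empty
     let inner' := if inner.contains p.2 then inner else inner.insert p.2 (0 : Int)
     cf'.insert p.1 (inner'.insert p.2 (inner'.getD p.2 0 + 1))) = pvStepA cf p := by
  simp only [pvStepA]
  by_cases h : cf.contains p.1
  · simp only [h, if_true]
    by_cases h2 : (cf.getD p.1 PySem.Dict.empty).contains p.2
    · simp only [h2, if_true]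
    · have h2' : (cf.getD p.1 PySem.Dict.empty).contains p.2 = false := by simpa using h2
      simp only [h2', Bool.false_eq_true, if_false]
      rw [PySem.Dict.getD_insert_self, pv_insert_insert,
        PySem.Dict.getD_of_not_contains _ _ h2']
  · have h' : cf.contains p.1 = false := by simpa using h
    simp only [h', Bool.false_eq_true, if_false]
    rw [PySem.Dict.getD_insert_self, PySem.Dict.getD_of_not_contains _ _ h']
    have he : (PySem.Dict.empty : PySem.Dict String Int).contains p.2 = false := by
      simp [PySem.Dict.contains_empty]
    simp only [he, Bool.false_eq_true, if_false]
    rw [PySem.Dict.getD_insert_self, pv_insert_insert, pv_insert_insert,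
      PySem.Dict.getD_empty]

-- the inner dict of a stepA fold is the fold over the matching next-chars
theorem pv_AI (w : String) : ∀ (ks : List (String × String)) (res : PySem.Dict String (PySem.Dict String Int)),
    (ks.foldl pvStepA res).getD w PySem.Dict.empty =
      ((ks.filter (fun p => p.1 == w)).map (fun p => p.2)).foldl
        (fun d c => d.insert c (d.getD c 0 + 1)) (res.getD w PySem.Dict.empty) := by
  intro ks
  induction ks with
  | nil => intro res; simp
  | cons p t ih =>
    intro res
    by_cases h : p.1 = w
    · simp only [List.foldl_cons, List.filter_cons, h, beq_self_eq_true, if_true, List.map_cons]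
      rw [ih]
      congr 1
      simp only [pvStepA, h, PySem.Dict.getD_insert_self]
    · have hb : (p.1 == w) = false := by simpa using h
      simp only [List.foldl_cons, List.filter_cons, hb, Bool.false_eq_true, if_false]
      rw [ih]
      congr 1
      simp only [pvStepA]
      rw [PySem.Dict.getD_insert_of_ne _ _ _ (fun e => h e.symm)]

-- a dict with nodup keys is its key list paired with its lookups
theorem pv_items_eq {κ ν : Type} [BEq κ] [LawfulBEq κ] (dflt : ν) :
    ∀ (l : List (κ × ν)), (l.map Prod.fst).Nodup →
      l = (l.map Prod.fst).map (fun w => (w, (PySem.Dict.mk l).getD w dflt)) := by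
  intro l
  induction l with
  | nil => intro _; rfl
  | cons p t ih =>
    intro hn
    simp only [List.map_cons, List.nodup_cons] at hn ⊢
    have h1 : (PySem.Dict.mk (p :: t)).getD p.1 dflt = p.2 := by
      rw [PySem.Dict.getD_eq_get?_getD, PySem.Dict.get?_mk_cons]
      simp
    rw [h1]
    congr 1
    · conv_lhs => rw [ih hn.2]
      apply List.map_congr_left
      intro w hw
      have hne : p.1 ≠ w := fun e => hn.1 (e ▸ hw)
      have hb : (p.1 == w) = false := by simpa using hne
      rw [PySem.Dict.getD_eq_get?_getD, PySem.Dict.getD_eq_get?_getD,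
        PySem.Dict.get?_mk_cons, hb]
      simp

-- items/keys of an arbitrary dict with nodup keys
theorem pv_items_eq_d {κ ν : Type} [BEq κ] [LawfulBEq κ] (d : PySem.Dict κ ν) (dflt : ν)
    (hn : d.keys.Nodup) : d.items = d.keys.map (fun w => (w, d.getD w dflt)) := by
  obtain ⟨l⟩ := d
  have hk : (PySem.Dict.mk l).keys = l.map Prod.fst := by simp [PySem.Dict.keys]
  rw [hk] at hn ⊢
  conv_lhs => rw [show (PySem.Dict.mk l).items = l from rfl, pv_items_eq dflt l hn]

-- the loop of port A is the pvStepA fold over the realised key sequence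
theorem pv_portA_fold (s : String) (k : Int) :
    (PySem.List.pyRange k (PySem.Str.len s) 1).foldl
      (fun cf i =>
        match PySem.Str.pyGet? s i with
        | none => cf
        | some ch =>
          let kmer := PySem.Str.slice s (some (i - k)) (some i)
          let c := String.ofList [ch]
          let cf' := if cf.contains kmer then cf else cf.insert kmer (PySem.Dict.empty : PySem.Dict String Int)
          let inner := cf'.getD kmer PySem.Dict.empty
          let inner' := if inner.contains c then inner else inner.insert c (0 : Int)
          cf'.insert kmer (inner'.insert c (inner'.getD c 0 + 1)))
      PySem.Dict.empty =
    ((PySem.List.pyRange k (PySem.Str.len s) 1).filterMap (pvKeyf s k)).foldl pvStepA PySem.Dict.empty := by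
  rw [List.foldl_filterMap]
  apply PySem.List.foldl_congr_mem
  intro acc i _
  cases h : PySem.Str.pyGet? s i with
  | none => simp only [pvKeyf, h, Option.map_none]
  | some ch =>
    simp only [pvKeyf, h, Option.map_some]
    exact pv_stepA_eq acc (PySem.Str.slice s (some (i - k)) (some i), String.ofList [ch])

-- B's setdefault-then-append step equals the normal form
theorem pv_stepB_eq (g : PySem.Dict String (List String)) (p : String × String) :
    (let g' := g.setdefault p.1 ([] : List String)
     g'.insert p.1 (g'.getD p.1 [] ++ [p.2])) = pvStepB g p := by
  simp only [pvStepB]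
  by_cases h : g.contains p.1
  · rw [PySem.Dict.setdefault_of_contains _ _ h]
  · have h' : g.contains p.1 = false := by simpa using h
    rw [PySem.Dict.setdefault_of_not_contains _ _ h']
    rw [PySem.Dict.getD_insert_self, pv_insert_insert,
      PySem.Dict.getD_of_not_contains _ _ h']

-- the loop of port B is the pvStepB fold over the realised key sequence
theorem pv_portB_fold (s : String) (k : Int) :
    (PySem.List.pyRange k (PySem.Str.len s) 1).foldl
      (fun g i =>
        match PySem.Str.pyGet? s i with
        | none => g
        | some ch =>
          let w := PySem.Str.slice s (some (i - k)) (some i)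
          let g' := g.setdefault w ([] : List String)
          g'.insert w (g'.getD w [] ++ [String.ofList [ch]]))
      PySem.Dict.empty =
    ((PySem.List.pyRange k (PySem.Str.len s) 1).filterMap (pvKeyf s k)).foldl pvStepB PySem.Dict.empty := by
  rw [List.foldl_filterMap]
  apply PySem.List.foldl_congr_mem
  intro acc i _
  cases h : PySem.Str.pyGet? s i with
  | none => simp only [pvKeyf, h, Option.map_none]
  | some ch =>
    simp only [pvKeyf, h, Option.map_some]
    exact pv_stepB_eq acc (PySem.Str.slice s (some (i - k)) (some i), String.ofList [ch])

-- the group of a stepB fold is the list of matching next-chars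
theorem pv_BI (w : String) : ∀ (ks : List (String × String)) (g : PySem.Dict String (List String)),
    (ks.foldl pvStepB g).getD w [] = g.getD w [] ++ (ks.filter (fun p => p.1 == w)).map Prod.snd := by
  intro ks
  induction ks with
  | nil => intro g; simp
  | cons p t ih =>
    intro g
    by_cases h : p.1 = w
    · simp only [List.foldl_cons, List.filter_cons, h, beq_self_eq_true, if_true, List.map_cons]
      rw [ih]
      simp only [pvStepB, h, PySem.Dict.getD_insert_self]
      simp
    · have hb : (p.1 == w) = false := by simpa using h
      simp only [List.foldl_cons, List.filter_cons, hb, Bool.false_eq_true, if_false]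
      rw [ih]
      simp only [pvStepB]
      rw [PySem.Dict.getD_insert_of_ne _ _ _ (fun e => h e.symm)]

-- both folds, rendered as the same dedup-and-count list
theorem pv_main (ks : List (String × String)) :
    (ks.foldl pvStepA PySem.Dict.empty).items.map (fun p => (p.1, p.2.items)) =
      (ks.foldl pvStepB PySem.Dict.empty).items.map (fun p =>
        (p.1, (PySem.Set.ofList p.2).map (fun c => (c, (p.2.count c : Int))))) := by
  have hformA : pvStepA = (fun d (p : String × String) => d.insert ((fun p : String × String => p.1) p)
      ((fun (d : PySem.Dict String (PySem.Dict String Int)) (p : String × String) =>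
        ((d.getD p.1 PySem.Dict.empty).insert p.2 ((d.getD p.1 PySem.Dict.empty).getD p.2 0 + 1))) d p)) := rfl
  have hformB : pvStepB = (fun d (p : String × String) => d.insert ((fun p : String × String => p.1) p)
      ((fun (d : PySem.Dict String (List String)) (p : String × String) =>
        (d.getD p.1 [] ++ [p.2])) d p)) := rfl
  have hkeysA : (ks.foldl pvStepA PySem.Dict.empty).keys = PySem.Set.ofList (ks.map Prod.fst) := by
    rw [hformA, PySem.Dict.keys_foldl_insert_key, PySem.Dict.keys_empty, PySem.Set.update_nil_left]
  have hkeysB : (ks.foldl pvStepB PySem.Dict.empty).keys = PySem.Set.ofList (ks.map Prod.fst) := by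
    rw [hformB, PySem.Dict.keys_foldl_insert_key, PySem.Dict.keys_empty, PySem.Set.update_nil_left]
  have hnodupA : (ks.foldl pvStepA PySem.Dict.empty).keys.Nodup := by
    rw [hkeysA]; exact PySem.Set.nodup_ofList _
  have hnodupB : (ks.foldl pvStepB PySem.Dict.empty).keys.Nodup := by
    rw [hkeysB]; exact PySem.Set.nodup_ofList _
  rw [pv_items_eq_d _ (PySem.Dict.empty : PySem.Dict String Int) hnodupA, hkeysA,
    pv_items_eq_d _ ([] : List String) hnodupB, hkeysB, List.map_map, List.map_map]
  apply List.map_congr_left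
  intro w _
  simp only [Function.comp]
  rw [pv_AI w ks, PySem.Dict.getD_empty,
    PySem.Dict.foldl_insert_getD_add_one_eq_counter, PySem.Dict.items_counter,
    pv_BI w ks, PySem.Dict.getD_empty, List.nil_append]

-- ===== VERDICT (by name: the statement is the Claim_ definition above) =====
theorem get_context_frequncies_spec : Claim_equal_get_context_frequncies := by
  intro s k _ _
  unfold Spec_get_context_frequncies get_context_frequncies get_context_frequncies_alt
  rw [pv_portA_fold, pv_portB_fold]
  exact pv_main _
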